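-- pv_equiv track=rewrite | github.com/kevinsu/aoc | 2024/day9/main.py | get_front_index
-- ===== SOURCE A (Python) =====
-- def get_front_index(raw, num):
--   front_index = len(raw)
--   for i in range(0, len(raw)-num):
--       open = True
--       if raw[i] != '.':
--         continue
--       for j in range(1, num):
--         if raw[i+j] != '.':
--           open = False
--           break
--       if open:
--         front_index = i
--         break
--   return front_index
-- ===== SOURCE B (Python) =====
-- def get_front_index(raw, num):
--   if num > len(raw):
--     return len(raw)
--   i = raw.find('.' * num)
--   return i if i != -1 else len(raw)
-- ===== Notes on version B (the rewrite author's own statement) =====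
-- stated objective: idiomatic
-- what changed: Replaced the nested Python-level window scan by a single substring search raw.find('.'*num) (with a trivial num>len guard), which returns the first index of num consecutive dots directly.
-- intended difference: When the only run of num consecutive dots in raw starts exactly at len(raw)-num (the last possible window), A's loop bound range(0, len(raw)-num) skips that start and A returns len(raw), while B returns len(raw)-num, the index of the existing free window, which is the intended answer. — e.g. on get_front_index("x..", 2): A returns 3, B returns 1
-- outside the precondition, e.g. on get_front_index('x.', 0): A returns 1, B returns 0; on get_front_index('ab', -1): A raises IndexError, B returns 0
import Mathlib
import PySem

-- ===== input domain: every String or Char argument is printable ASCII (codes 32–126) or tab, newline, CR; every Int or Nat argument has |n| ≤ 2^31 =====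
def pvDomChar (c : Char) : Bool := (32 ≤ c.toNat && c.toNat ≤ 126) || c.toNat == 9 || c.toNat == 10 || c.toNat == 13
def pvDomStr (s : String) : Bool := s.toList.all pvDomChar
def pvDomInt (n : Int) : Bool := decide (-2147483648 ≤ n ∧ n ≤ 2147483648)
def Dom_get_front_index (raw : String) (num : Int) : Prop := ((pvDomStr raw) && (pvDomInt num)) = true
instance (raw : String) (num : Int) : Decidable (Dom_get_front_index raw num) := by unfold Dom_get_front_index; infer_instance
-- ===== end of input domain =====

-- B replaces A's nested Python-level window scan by a single substring search raw.find('.'*num);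
-- on the corner where the only dot window starts at len-num, B returns that index while A misses it (see D_).


-- ===== PORT A =====
-- inner loop: for j in range(1, num): if raw[i+j] != '.': open = False; break
def goJ (raw : String) (i : Int) : List Int → Bool
  | [] => true
  | j :: rest => if PySem.Str.pyGet? raw (i + j) ≠ some '.' then false else goJ raw i rest

-- outer loop: for i in range(0, len(raw)-num), break sets front_index = i
def goA (raw : String) (num : Int) : List Int → Int
  | [] => PySem.Str.len raw
  | i :: rest =>
    if PySem.Str.pyGet? raw i ≠ some '.' then goA raw num rest
    else if goJ raw i (PySem.List.pyRange 1 num 1) then i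
    else goA raw num rest

def get_front_index (raw : String) (num : Int) : Int :=
  goA raw num (PySem.List.pyRange 0 (PySem.Str.len raw - num) 1)

-- ===== PORT B =====
-- if num > len(raw): return len(raw); i = raw.find('.' * num); return i if i != -1 else len(raw)
def get_front_index_alt (raw : String) (num : Int) : Int :=
  if num > PySem.Str.len raw then PySem.Str.len raw
  else
    let i := PySem.Str.find raw (String.ofList (List.replicate num.toNat '.'))
    if i ≠ -1 then i else PySem.Str.len raw

-- ===== PRECONDITION & SPEC =====
-- Pre_ restricts to the natural domain num >= 1 ('find num consecutive dots'): for num < 0 A can raise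
-- IndexError, and for num = 0 A's value (index of the first single dot, from its empty inner loop) and
-- B's value (0, the empty window) are both accidents of asking for a window of no dots.
def Pre_get_front_index (raw : String) (num : Int) : Prop := 1 ≤ num
instance (raw : String) (num : Int) : Decidable (Pre_get_front_index raw num) := by
  unfold Pre_get_front_index; infer_instance

def pvWitness_get_front_index : String × Int := ("..x", 1)

-- When the only run of num consecutive dots in raw starts exactly at len(raw)-num (the last possible
-- window: num trailing dots, and no num-dot run anywhere earlier), A's loop bound range(0, len-num)
-- skips that start and A returns len(raw); B returns len(raw)-num, the index of the existing free
-- window, which is the intended answer.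
def D_get_front_index (raw : String) (num : Int) : Prop :=
  1 ≤ num ∧ num ≤ (raw.toList.length : Int) ∧
  List.replicate num.toNat '.' <:+ raw.toList ∧
  ¬ List.replicate num.toNat '.' <:+: raw.toList.dropLast
instance (raw : String) (num : Int) : Decidable (D_get_front_index raw num) := by
  unfold D_get_front_index; infer_instance

def Spec_get_front_index (raw : String) (num : Int) (out : Int) : Prop :=
  ¬ D_get_front_index raw num → out = get_front_index_alt raw num
instance (raw : String) (num : Int) (out : Int) : Decidable (Spec_get_front_index raw num out) := by
  unfold Spec_get_front_index; infer_instance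

def pvDiffWitness_get_front_index : String × Int := ("x..", 2)
def pvDiffWitnessOut_get_front_index : Int × Int := (3, 1)

-- ===== CLAIM (what is proved, stated in full; the proofs are below) =====
def Claim_unchanged_get_front_index : Prop := ∀ (raw : String) (num : Int), Dom_get_front_index raw num → Pre_get_front_index raw num → Spec_get_front_index raw num (get_front_index raw num)
def Claim_changed_get_front_index : Prop := Dom_get_front_index (pvDiffWitness_get_front_index.1) (pvDiffWitness_get_front_index.2) ∧ Pre_get_front_index (pvDiffWitness_get_front_index.1) (pvDiffWitness_get_front_index.2) ∧ D_get_front_index (pvDiffWitness_get_front_index.1) (pvDiffWitness_get_front_index.2) ∧ get_front_index (pvDiffWitness_get_front_index.1) (pvDiffWitness_get_front_index.2) = pvDiffWitnessOut_get_front_index.1 ∧ get_front_index_alt (pvDiffWitness_get_front_index.1) (pvDiffWitness_get_front_index.2) = pvDiffWitnessOut_get_front_index.2 ∧ pvDiffWitnessOut_get_front_index.1 ≠ pvDiffWitnessOut_get_front_index.2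
def Claim_exact_get_front_index : Prop := ∀ (raw : String) (num : Int), Dom_get_front_index raw num → Pre_get_front_index raw num → D_get_front_index raw num → get_front_index raw num ≠ get_front_index_alt raw num

-- ===== LEMMAS AND PROOFS =====

-- window test used only by the proofs: positions i, i+1, ..., i+n-1 exist and are all dots
def isWin (l : List Char) (n : Nat) (i : Nat) : Bool :=
  decide (i + n ≤ l.length) && ((l.drop i).take n).all (· == '.')

-- first window start: the common specification both ports are reduced to
def fw (n : Nat) : List Char → Option Nat
  | [] => none
  | c :: rest => if isWin (c :: rest) n 0 then some 0 else (fw n rest).map (· + 1)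

theorem isWin_cons (c : Char) (l : List Char) (n i : Nat) :
    isWin (c :: l) n (i + 1) = isWin l n i := by
  simp only [isWin, List.drop_succ_cons, List.length_cons]
  congr 1
  exact decide_eq_decide.mpr (by omega)

theorem take_replicate_append (run n : Nat) (h : run ≤ n) (l : List Char) :
    (List.replicate run '.' ++ l).take n = List.replicate run '.' ++ l.take (n - run) := by
  rw [List.take_append, List.take_replicate, List.length_replicate]
  have : min n run = run := by omega
  rw [this]

theorem fw_nondot (n : Nat) (hn : 1 ≤ n) (run : Nat) (hrun : run < n) (c : Char) (hc : c ≠ '.')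
    (rest : List Char) :
    fw n (List.replicate run '.' ++ c :: rest) = (fw n rest).map (· + run + 1) := by
  induction run with
  | zero =>
    have hwin : isWin (c :: rest) n 0 = false := by
      simp only [isWin, List.drop_zero]
      have hall : ((c :: rest).take n).all (· == '.') = false := by
        rw [List.all_eq_false]
        refine ⟨c, ?_, by simp [hc]⟩
        cases n with
        | zero => omega
        | succ m => simp [List.take]
      rw [hall, Bool.and_false]
    simp [fw, hwin]
  | succ r ih =>
    have hr : r < n := by omega
    have hwin : isWin ('.' :: (List.replicate r '.' ++ c :: rest)) n 0 = false := by
      simp only [isWin, List.drop_zero]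
      have hall : (('.' :: (List.replicate r '.' ++ c :: rest)).take n).all (· == '.') = false := by
        rw [List.all_eq_false]
        refine ⟨c, ?_, by simp [hc]⟩
        have h1 : ('.' :: (List.replicate r '.' ++ c :: rest)) =
            List.replicate (r + 1) '.' ++ c :: rest := by
          simp [List.replicate_succ]
        rw [h1, take_replicate_append (r + 1) n (by omega)]
        refine List.mem_append.mpr (Or.inr ?_)
        cases hk : n - (r + 1) with
        | zero => omega
        | succ m => simp
      rw [hall, Bool.and_false]
    have h1 : List.replicate (r + 1) ('.' : Char) ++ c :: rest =
        '.' :: (List.replicate r '.' ++ c :: rest) := by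
      simp [List.replicate_succ]
    rw [h1, fw, if_neg (by simp [hwin]), ih hr]
    cases fw n rest with
    | none => simp
    | some j => simp only [Option.map_some, Option.some.injEq]; omega

theorem fw_sound (n : Nat) (l : List Char) (i : Nat) (h : fw n l = some i) :
    isWin l n i = true := by
  induction l generalizing i with
  | nil => simp [fw] at h
  | cons c t ih =>
    rw [fw] at h
    by_cases hw : isWin (c :: t) n 0 = true
    · rw [if_pos hw] at h
      cases h
      exact hw
    · rw [if_neg hw] at h
      cases ht : fw n t with
      | none => rw [ht] at h; simp at h
      | some j =>
        rw [ht] at h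
        simp at h
        rw [← h, isWin_cons]
        exact ih j ht

theorem fw_le (n : Nat) (l : List Char) (i : Nat) (h : fw n l = some i) :
    i + n ≤ l.length := by
  have := fw_sound n l i h
  simp only [isWin, Bool.and_eq_true, decide_eq_true_iff] at this
  exact this.1

theorem fw_min (n : Nat) (l : List Char) (i : Nat) (h : fw n l = some i) :
    ∀ k < i, isWin l n k = false := by
  induction l generalizing i with
  | nil => simp [fw] at h
  | cons c t ih =>
    rw [fw] at h
    by_cases hw : isWin (c :: t) n 0 = true
    · rw [if_pos hw] at h
      cases h
      omega
    · rw [if_neg hw] at h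
      cases ht : fw n t with
      | none => rw [ht] at h; simp at h
      | some j =>
        rw [ht] at h
        simp at h
        intro k hk
        cases k with
        | zero => simpa using hw
        | succ m =>
          rw [isWin_cons]
          exact ih j ht m (by omega)

theorem fw_isSome_of_win (n : Nat) (hn : 1 ≤ n) (l : List Char) (i : Nat)
    (h : isWin l n i = true) : (fw n l).isSome = true := by
  induction l generalizing i with
  | nil =>
    exfalso
    simp only [isWin, List.length_nil, Bool.and_eq_true, decide_eq_true_iff] at h
    omega
  | cons c t ih =>
    rw [fw]
    by_cases hw : isWin (c :: t) n 0 = true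
    · rw [if_pos hw]; rfl
    · rw [if_neg hw]
      cases i with
      | zero => exact absurd h hw
      | succ m =>
        rw [isWin_cons] at h
        have hs := ih m h
        cases hft : fw n t with
        | none => rw [hft] at hs; simp at hs
        | some j => simp

theorem goJ_spec (raw : String) (n i : Nat) (hle : i + n ≤ raw.toList.length) :
    ∀ (m j : Nat), n - j = m → 1 ≤ j → j ≤ n →
    goJ raw (i : Int) (PySem.List.pyRange (j : Int) (n : Int) 1) =
      ((raw.toList.drop (i + j)).take (n - j)).all (· == '.') := by
  intro m
  induction m with
  | zero =>
    intro j hd hj1 hjn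
    rw [PySem.List.pyRange_one_eq_nil (by exact_mod_cast (by omega : n ≤ j))]
    rw [hd]
    simp [goJ]
  | succ m ih =>
    intro j hd hj1 hjn
    have hjn' : j < n := by omega
    rw [PySem.List.pyRange_one_cons (by exact_mod_cast hjn')]
    rw [goJ]
    have hidx : i + j < raw.toList.length := by omega
    have hget : PySem.List.pyGet? raw.toList ((i : Int) + (j : Int)) = some (raw.toList[i + j]) := by
      have hcast : ((i : Int) + (j : Int)) = ((i + j : Nat) : Int) := by push_cast; ring
      rw [hcast, PySem.List.pyGet?_natCast]
      exact List.getElem?_eq_getElem hidx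
    have hdrop : raw.toList.drop (i + j) = raw.toList[i + j] :: raw.toList.drop (i + j + 1) :=
      List.drop_eq_getElem_cons hidx
    have hnj : n - j = (n - (j + 1)) + 1 := by omega
    by_cases hcc : raw.toList[i + j] = '.'
    · rw [if_neg (by simp [hget, hcc])]
      have hc1 : (j : Int) + 1 = ((j + 1 : Nat) : Int) := by push_cast; ring
      rw [hc1, ih (j + 1) (by omega) (by omega) (by omega)]
      rw [hdrop, hnj, List.take_succ_cons, List.all_cons]
      have hsh : i + j + 1 = i + (j + 1) := by omega
      simp [hcc, hsh]
    · rw [if_pos (by simp [hget, hcc])]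
      rw [hdrop, hnj, List.take_succ_cons, List.all_cons]
      simp [hcc]

theorem goA_spec (raw : String) (n : Nat) (hn : 1 ≤ n) :
    ∀ (m k : Nat), raw.toList.length - k = m →
    goA raw (n : Int) (PySem.List.pyRange (k : Int) ((raw.toList.length : Int) - (n : Int)) 1) =
      (match fw n (raw.toList.drop k) with
       | some i => if ((k + i : Nat) : Int) < (raw.toList.length : Int) - (n : Int)
                   then ((k + i : Nat) : Int) else (raw.toList.length : Int)
       | none => (raw.toList.length : Int)) := by
  intro m
  induction m with
  | zero =>
    intro k hm
    have hkL : raw.toList.length ≤ k := by omega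
    have hnb : ¬ ((k : Int) < (raw.toList.length : Int) - (n : Int)) := by omega
    rw [PySem.List.pyRange_one_eq_nil (by omega)]
    have hshort : fw n (raw.toList.drop k) = none := by
      cases hf : fw n (raw.toList.drop k) with
      | none => rfl
      | some i =>
        have := fw_le n _ i hf
        rw [List.length_drop] at this
        omega
    rw [hshort]
    simp [goA]
  | succ m ih =>
    intro k hm
    by_cases hb : (k : Int) < (raw.toList.length : Int) - (n : Int)
    · have hkn : k + n < raw.toList.length := by push_cast at hb; omega
      have hkL : k < raw.toList.length := by omega
      rw [PySem.List.pyRange_one_cons hb]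
      rw [goA]
      have hget : raw.toList[k]? = some (raw.toList[k]) := List.getElem?_eq_getElem hkL
      have hdropk : raw.toList.drop k = raw.toList[k] :: raw.toList.drop (k + 1) :=
        List.drop_eq_getElem_cons hkL
      have hrec : (k : Int) + 1 = ((k + 1 : Nat) : Int) := by push_cast; ring
      by_cases hck : raw.toList[k] = '.'
      · rw [if_neg (by simp [hget, hck])]
        have hgJ : goJ raw (k : Int) (PySem.List.pyRange (1 : Int) (n : Int) 1) =
            ((raw.toList.drop (k + 1)).take (n - 1)).all (· == '.') := by
          have := goJ_spec raw n k (by omega) (n - 1) 1 (by omega) (by omega) (by omega)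
          simpa using this
        by_cases hall : ((raw.toList.drop (k + 1)).take (n - 1)).all (· == '.') = true
        · rw [if_pos (by rw [hgJ]; exact hall)]
          have hwin : isWin (raw.toList.drop k) n 0 = true := by
            simp only [isWin, List.drop_zero, Bool.and_eq_true, decide_eq_true_iff]
            constructor
            · rw [List.length_drop]; omega
            · rw [hdropk]
              have ht : (raw.toList[k] :: raw.toList.drop (k + 1)).take n =
                  raw.toList[k] :: (raw.toList.drop (k + 1)).take (n - 1) := by
                cases n with
                | zero => omega
                | succ p => rw [List.take_succ_cons, Nat.add_sub_cancel]
              rw [ht, List.all_cons]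
              simp [hck, hall]
          have hfw : fw n (raw.toList.drop k) = some 0 := by
            rw [hdropk, fw, if_pos (by rw [← hdropk]; exact hwin)]
          rw [hfw]
          have hk0 : ((k + 0 : Nat) : Int) = (k : Int) := by push_cast; ring
          simp only [hk0]
          rw [if_pos hb]
        · rw [if_neg (by rw [hgJ]; simpa using hall)]
          have hwin : isWin (raw.toList.drop k) n 0 = false := by
            simp only [isWin, List.drop_zero]
            have ht : (raw.toList.drop k).take n =
                raw.toList[k] :: (raw.toList.drop (k + 1)).take (n - 1) := by
              rw [hdropk]
              cases n with
              | zero => omega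
              | succ p => rw [List.take_succ_cons, Nat.add_sub_cancel]
            rw [ht, List.all_cons]
            have : ((raw.toList.drop (k + 1)).take (n - 1)).all (· == '.') = false :=
              Bool.eq_false_iff.mpr hall
            simp [this]
          have hfw : fw n (raw.toList.drop k) = (fw n (raw.toList.drop (k + 1))).map (· + 1) := by
            rw [hdropk, fw, if_neg (by rw [← hdropk]; simp [hwin])]
          rw [hfw, hrec, ih (k + 1) (by omega)]
          cases fw n (raw.toList.drop (k + 1)) with
          | none => simp
          | some i =>
            have hsh : (k + 1) + i = k + (i + 1) := by omega
            simp [hsh]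
      · rw [if_pos (by simp [hget, hck])]
        have hfw : fw n (raw.toList.drop k) = (fw n (raw.toList.drop (k + 1))).map (· + 1) := by
          rw [hdropk]
          have := fw_nondot n hn 0 (by omega) (raw.toList[k]) hck (raw.toList.drop (k + 1))
          simpa using this
        rw [hfw, hrec, ih (k + 1) (by omega)]
        cases fw n (raw.toList.drop (k + 1)) with
        | none => simp
        | some i =>
          have hsh : (k + 1) + i = k + (i + 1) := by omega
          simp [hsh]
    · rw [PySem.List.pyRange_one_eq_nil (by omega)]
      have hkn : raw.toList.length ≤ k + n := by push_cast at hb; omega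
      cases hf : fw n (raw.toList.drop k) with
      | none => simp [goA]
      | some i =>
        have hle := fw_le n _ i hf
        rw [List.length_drop] at hle
        have hnlt : ¬ (((k + i : Nat) : Int) < (raw.toList.length : Int) - (n : Int)) := by
          push_cast; omega
        have hgoA : goA raw (n : Int) [] = (raw.toList.length : Int) := by
          show PySem.Str.len raw = (raw.toList.length : Int)
          simp
        rw [hgoA]
        exact (if_neg hnlt).symm

theorem A_fw (raw : String) (n : Nat) (hn : 1 ≤ n) :
    get_front_index raw (n : Int) =
      (match fw n raw.toList with
       | some i => if (i : Int) < (raw.toList.length : Int) - (n : Int)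
                   then (i : Int) else (raw.toList.length : Int)
       | none => (raw.toList.length : Int)) := by
  have h0 : ((0 : Nat) : Int) = (0 : Int) := rfl
  have := goA_spec raw n hn raw.toList.length 0 (by omega)
  rw [h0] at this
  unfold get_front_index
  have hlen : PySem.Str.len raw = (raw.toList.length : Int) := by simp
  rw [hlen, this, List.drop_zero]
  cases fw n raw.toList with
  | none => rfl
  | some i => simp

theorem win_iff_prefix (l : List Char) (n k : Nat) (hn : 1 ≤ n) :
    isWin l n k = true ↔ List.replicate n '.' <+: l.drop k := by
  have hiff : isWin l n k = true ↔
      ((l.drop k).take n).length = n ∧ ∀ b ∈ (l.drop k).take n, b = '.' := by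
    simp only [isWin, Bool.and_eq_true, decide_eq_true_iff, List.all_eq_true, beq_iff_eq,
      List.length_take, List.length_drop]
    constructor
    · rintro ⟨h1, h2⟩
      exact ⟨by omega, h2⟩
    · rintro ⟨h1, h2⟩
      exact ⟨by omega, h2⟩
  rw [hiff, List.prefix_iff_eq_take, List.length_replicate]
  rw [show (List.replicate n ('.' : Char) = (l.drop k).take n) ↔
      ((l.drop k).take n = List.replicate n '.') from ⟨Eq.symm, Eq.symm⟩]
  rw [List.eq_replicate_iff]

theorem dropLast_drop_eq (l : List Char) (k : Nat) :
    l.dropLast.drop k = (l.drop k).take (l.length - 1 - k) := by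
  rw [List.dropLast_eq_take, List.drop_take]

theorem infix_dropLast_iff (l : List Char) (n : Nat) (hn : 1 ≤ n) :
    List.replicate n '.' <:+: l.dropLast ↔ ∃ k, k < l.length - n ∧ isWin l n k = true := by
  rw [← PySem.Chars.isIn_iff_infix, ← PySem.Chars.exists_prefix_drop_iff_isIn]
  constructor
  · rintro ⟨j, hj⟩
    have hlen := hj.length_le
    simp only [List.length_replicate, List.length_drop, List.length_dropLast] at hlen
    rw [dropLast_drop_eq] at hj
    have hj2 : List.replicate n '.' <+: l.drop j := hj.trans (List.take_prefix _ _)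
    exact ⟨j, by omega, (win_iff_prefix l n j hn).mpr hj2⟩
  · rintro ⟨k, hk, hw⟩
    refine ⟨k, ?_⟩
    rw [dropLast_drop_eq, List.prefix_take_iff]
    refine ⟨(win_iff_prefix l n k hn).mp hw, ?_⟩
    rw [List.length_replicate]
    omega

theorem suffix_iff_win (l : List Char) (n : Nat) (hn : 1 ≤ n) :
    List.replicate n '.' <:+ l ↔ n ≤ l.length ∧ isWin l n (l.length - n) = true := by
  constructor
  · intro hs
    have hle : n ≤ l.length := by simpa using hs.length_le
    refine ⟨hle, (win_iff_prefix l n _ hn).mpr ?_⟩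
    rw [List.suffix_iff_eq_drop, List.length_replicate] at hs
    rw [← hs]
  · rintro ⟨hle, hw⟩
    have hp := (win_iff_prefix l n _ hn).mp hw
    have heq : List.replicate n '.' = l.drop (l.length - n) :=
      hp.eq_of_length (by simp; omega)
    rw [heq]
    exact List.drop_suffix _ _

theorem B_fw (raw : String) (n : Nat) (hn : 1 ≤ n) :
    get_front_index_alt raw (n : Int) =
      (match fw n raw.toList with
       | some i => (i : Int)
       | none => (raw.toList.length : Int)) := by
  unfold get_front_index_alt
  have hlen : PySem.Str.len raw = ((raw.toList.length : Nat) : Int) := by simp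
  by_cases hgt : (n : Int) > PySem.Str.len raw
  case pos =>
    rw [if_pos hgt]
    have hshort : fw n raw.toList = none := by
      cases hf : fw n raw.toList with
      | none => rfl
      | some i =>
        have hle := fw_le _ _ _ hf
        rw [hlen] at hgt
        exfalso
        omega
    rw [hshort, hlen]
  rw [if_neg hgt]
  have hfind : PySem.Str.find raw (String.ofList (List.replicate ((n : Int)).toNat '.')) =
      PySem.Chars.find raw.toList (List.replicate n '.') := by
    simp
  rw [hfind]
  cases hf : fw n raw.toList with
  | none =>
    have hninf : ¬ List.replicate n '.' <:+: raw.toList := by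
      intro hinf
      have hex : ∃ j, List.replicate n '.' <+: raw.toList.drop j := by
        rw [PySem.Chars.exists_prefix_drop_iff_isIn, PySem.Chars.isIn_iff_infix]
        exact hinf
      obtain ⟨j, hj⟩ := hex
      have hw := (win_iff_prefix raw.toList n j hn).mpr hj
      have hs := fw_isSome_of_win n hn raw.toList j hw
      rw [hf] at hs
      simp at hs
    rw [(PySem.Chars.find_eq_neg_one_iff raw.toList (List.replicate n '.')).mpr hninf]
    simp
  | some i =>
    have hw := fw_sound _ _ _ hf
    have hmin := fw_min _ _ _ hf
    have hinf : List.replicate n '.' <:+: raw.toList := by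
      rw [← PySem.Chars.isIn_iff_infix, ← PySem.Chars.exists_prefix_drop_iff_isIn]
      exact ⟨i, (win_iff_prefix raw.toList n i hn).mp hw⟩
    have hnn : 0 ≤ PySem.Chars.find raw.toList (List.replicate n '.') :=
      (PySem.Chars.find_nonneg_iff raw.toList (List.replicate n '.')).mpr hinf
    obtain ⟨hpre, hminf⟩ := PySem.Chars.find_spec hnn
    have hieq : (PySem.Chars.find raw.toList (List.replicate n '.')).toNat = i := by
      by_contra hne
      rcases Nat.lt_or_ge (PySem.Chars.find raw.toList (List.replicate n '.')).toNat i with hlt | hge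
      · have hwk := (win_iff_prefix raw.toList n _ hn).mpr hpre
        rw [hmin _ hlt] at hwk
        exact Bool.false_ne_true hwk
      · have hlt2 : i < (PySem.Chars.find raw.toList (List.replicate n '.')).toNat := by omega
        exact hminf i hlt2 ((win_iff_prefix raw.toList n i hn).mp hw)
    have hfi : PySem.Chars.find raw.toList (List.replicate n '.') = (i : Int) := by
      rw [← hieq]
      exact (Int.toNat_of_nonneg hnn).symm
    rw [hfi]
    rw [if_pos (by omega)]

theorem A_fw_some (raw : String) (n : Nat) (hn : 1 ≤ n) (i : Nat)
    (hf : fw n raw.toList = some i) :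
    get_front_index raw (n : Int) =
      (if (i : Int) < (raw.toList.length : Int) - (n : Int)
       then (i : Int) else (raw.toList.length : Int)) := by
  rw [A_fw raw n hn, hf]

theorem A_fw_none (raw : String) (n : Nat) (hn : 1 ≤ n) (hf : fw n raw.toList = none) :
    get_front_index raw (n : Int) = (raw.toList.length : Int) := by
  rw [A_fw raw n hn, hf]

theorem B_fw_some (raw : String) (n : Nat) (hn : 1 ≤ n) (i : Nat)
    (hf : fw n raw.toList = some i) :
    get_front_index_alt raw (n : Int) = (i : Int) := by
  rw [B_fw raw n hn, hf]

theorem B_fw_none (raw : String) (n : Nat) (hn : 1 ≤ n) (hf : fw n raw.toList = none) :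
    get_front_index_alt raw (n : Int) = (raw.toList.length : Int) := by
  rw [B_fw raw n hn, hf]

theorem fw_of_D (raw : String) (num : Int) (hD : D_get_front_index raw num) :
    fw num.toNat raw.toList = some (raw.toList.length - num.toNat) := by
  obtain ⟨h1, hlen, hsuf, hninf⟩ := hD
  have hn1 : 1 ≤ num.toNat := by omega
  obtain ⟨hle, h3⟩ := (suffix_iff_win raw.toList num.toNat hn1).mp hsuf
  have h4 : ∀ k < raw.toList.length - num.toNat, isWin raw.toList num.toNat k = false := by
    intro k hk
    by_contra hcontra
    exact hninf ((infix_dropLast_iff raw.toList num.toNat hn1).mpr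
      ⟨k, hk, by simpa using hcontra⟩)
  have hs := fw_isSome_of_win num.toNat hn1 raw.toList _ h3
  cases hf : fw num.toNat raw.toList with
  | none => rw [hf] at hs; simp at hs
  | some j =>
    have hj := fw_sound _ _ _ hf
    have hjle := fw_le _ _ _ hf
    have hmin := fw_min _ _ _ hf
    congr 1
    by_cases hlt : j < raw.toList.length - num.toNat
    · rw [h4 j hlt] at hj; simp at hj
    · rcases Nat.lt_or_ge (raw.toList.length - num.toNat) j with hlt2 | hge2
      · have := hmin _ hlt2
        rw [h3] at this; simp at this
      · omega

theorem get_front_index_spec : Claim_unchanged_get_front_index := by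
  intro raw num hdom hpre hnD
  have hn1 : 1 ≤ num.toNat := by
    unfold Pre_get_front_index at hpre; omega
  have hnum : num = (num.toNat : Int) := by
    unfold Pre_get_front_index at hpre; omega
  rw [hnum]
  cases hf : fw num.toNat raw.toList with
  | none => rw [A_fw_none raw num.toNat hn1 hf, B_fw_none raw num.toNat hn1 hf]
  | some i =>
    rw [A_fw_some raw num.toNat hn1 i hf, B_fw_some raw num.toNat hn1 i hf]
    have hwin := fw_sound _ _ _ hf
    have hle := fw_le _ _ _ hf
    have hmin := fw_min _ _ _ hf
    by_cases hlt : i + num.toNat < raw.toList.length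
    · rw [if_pos (by omega)]
    · exfalso
      apply hnD
      have hieq : i = raw.toList.length - num.toNat := by omega
      refine ⟨hpre, ?_, ?_, ?_⟩
      · rw [hnum]
        exact_mod_cast (by omega : num.toNat ≤ raw.toList.length)
      · exact (suffix_iff_win raw.toList num.toNat hn1).mpr ⟨by omega, by rw [← hieq]; exact hwin⟩
      · intro hinf
        obtain ⟨k, hk, hw⟩ := (infix_dropLast_iff raw.toList num.toNat hn1).mp hinf
        rw [hmin k (by omega)] at hw
        exact Bool.false_ne_true hw

theorem get_front_index_changed : Claim_changed_get_front_index := by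
  unfold Claim_changed_get_front_index; decide

theorem get_front_index_tight : Claim_exact_get_front_index := by
  intro raw num hdom hpre hD
  have hn1 : 1 ≤ num.toNat := by
    unfold Pre_get_front_index at hpre; omega
  have hnum : num = (num.toNat : Int) := by
    unfold Pre_get_front_index at hpre; omega
  have hf : fw num.toNat raw.toList = some (raw.toList.length - num.toNat) := fw_of_D raw num hD
  have hnL : num.toNat ≤ raw.toList.length := by
    have := hD.2.1
    omega
  rw [hnum, A_fw_some raw num.toNat hn1 _ hf, B_fw_some raw num.toNat hn1 _ hf]
  rw [if_neg (by rw [Nat.cast_sub hnL]; omega)]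
  intro hcontra
  rw [Nat.cast_sub hnL] at hcontra
  omega
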